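-- pv_equiv track=rewrite | github.com/remiss-project/MultiModal | utils/graph_stuff.py | check_graph_dataformat_place_date
-- ===== SOURCE A (Python) =====
-- def check_graph_dataformat_place_date(graph):
--     nodes = graph.get('nodes', [])
--
--     # Check entities of type location
--     for node in nodes:
--         if node[1]['ent_type'] == 'LOCATION':
--             location_data = node[1]['data'].split(',')
--             if len(location_data) != 3:
--                 return 1  # Return 1 if condition not met for location data
--
--     # Check entities of type date
--     for node in nodes:
--         if node[1]['ent_type'] == 'DATE':
--             date_data = node[1]['data'].split(',')
--             if len(date_data) != 4:
--                 return 2  # Return 2 if condition not met for date data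
--
--     # Return 0 if both conditions are met
--     return 0
-- ===== SOURCE B (Python) =====
-- def check_graph_dataformat_place_date(graph):
--     date_entries = []
--     for node in graph.get('nodes', []):
--         ent_type = node[1]['ent_type']
--         if ent_type == 'LOCATION':
--             if len(node[1]['data'].split(',')) != 3:
--                 return 1
--         elif ent_type == 'DATE':
--             date_entries.append(node[1])
--     for entry in date_entries:
--         if len(entry['data'].split(',')) != 4:
--             return 2
--     return 0
-- ===== Notes on version B (the rewrite author's own statement) =====
-- stated objective: alternative
-- what changed: Instead of A's two full scans over the node list, B makes one scan that returns 1 at a bad LOCATION node and collects the DATE node dicts into a side list, then checks only that collected list for the date error; B raises KeyError on exactly the same inputs as A.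
import Mathlib
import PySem

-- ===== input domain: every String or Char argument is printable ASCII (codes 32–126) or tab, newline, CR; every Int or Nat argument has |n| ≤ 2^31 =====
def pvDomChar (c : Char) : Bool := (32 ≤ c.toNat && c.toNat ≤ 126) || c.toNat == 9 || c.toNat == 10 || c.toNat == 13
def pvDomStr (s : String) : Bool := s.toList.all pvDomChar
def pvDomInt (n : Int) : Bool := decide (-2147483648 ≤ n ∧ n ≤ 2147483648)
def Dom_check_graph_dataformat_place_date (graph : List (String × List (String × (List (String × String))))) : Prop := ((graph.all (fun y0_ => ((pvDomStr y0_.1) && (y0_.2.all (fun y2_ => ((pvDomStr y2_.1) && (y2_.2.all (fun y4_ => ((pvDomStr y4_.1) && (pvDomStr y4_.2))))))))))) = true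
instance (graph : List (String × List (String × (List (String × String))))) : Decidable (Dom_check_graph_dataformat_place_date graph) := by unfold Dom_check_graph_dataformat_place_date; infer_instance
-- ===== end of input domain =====

-- B replaces A's two full scans of the node list by one scan that collects the DATE dicts into a side
-- list checked afterwards; objective: alternative (same cost, one traversal of the nodes).

-- ===== PORT A =====
-- first loop of A: return 1 at the first LOCATION node whose data does not split into 3 parts
def pvLocLoop (nodes : List (String × (List (String × String)))) : Option Int :=
  match nodes with
  | [] => none
  | n :: rest =>
    if PySem.Dict.getD (PySem.Dict.mk n.2) "ent_type" "" = "LOCATION" then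
      if ((PySem.Str.split? (PySem.Dict.getD (PySem.Dict.mk n.2) "data" "") ",").getD []).length ≠ 3 then
        some 1
      else pvLocLoop rest
    else pvLocLoop rest

-- second loop of A: return 2 at the first DATE node whose data does not split into 4 parts
def pvDateLoop (nodes : List (String × (List (String × String)))) : Option Int :=
  match nodes with
  | [] => none
  | n :: rest =>
    if PySem.Dict.getD (PySem.Dict.mk n.2) "ent_type" "" = "DATE" then
      if ((PySem.Str.split? (PySem.Dict.getD (PySem.Dict.mk n.2) "data" "") ",").getD []).length ≠ 4 then
        some 2
      else pvDateLoop rest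
    else pvDateLoop rest

def check_graph_dataformat_place_date (graph : List (String × List (String × (List (String × String))))) : Int :=
  let nodes := PySem.Dict.getD (PySem.Dict.mk graph) "nodes" []
  match pvLocLoop nodes with
  | some r => r
  | none =>
    match pvDateLoop nodes with
    | some r => r
    | none => 0

-- ===== PORT B =====
-- B-side shorthands: node[1]['ent_type'] (resp. len(node[1]['data'].split(',')))
def pvEntB (m : List (String × String)) : String :=
  PySem.Dict.getD (PySem.Dict.mk m) "ent_type" ""
def pvDataLenB (m : List (String × String)) : Nat :=
  ((PySem.Str.split? (PySem.Dict.getD (PySem.Dict.mk m) "data" "") ",").getD []).length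

-- B's single scan: none = "returned 1"; some ds = the collected DATE dicts, appended in node order
def pvCollect (nodes : List (String × (List (String × String))))
    (dates : List (List (String × String))) : Option (List (List (String × String))) :=
  match nodes with
  | [] => some dates
  | n :: rest =>
    if pvEntB n.2 = "LOCATION" then
      if pvDataLenB n.2 ≠ 3 then none else pvCollect rest dates
    else if pvEntB n.2 = "DATE" then pvCollect rest (dates ++ [n.2])
    else pvCollect rest dates

-- B's second loop, over the collected DATE dicts only
def pvDateCheck (entries : List (List (String × String))) : Int :=
  match entries with
  | [] => 0
  | d :: rest => if pvDataLenB d ≠ 4 then 2 else pvDateCheck rest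

def check_graph_dataformat_place_date_alt (graph : List (String × List (String × (List (String × String))))) : Int :=
  match pvCollect (PySem.Dict.getD (PySem.Dict.mk graph) "nodes" []) [] with
  | none => 1
  | some entries => pvDateCheck entries

-- ===== PRECONDITION & SPEC =====
-- helper predicates for Pre_ (closed-form properties of a single node's dict)
def pvEntOf (m : List (String × String)) : Option String := PySem.Dict.get? (PySem.Dict.mk m) "ent_type"
def pvSplitLenOf (m : List (String × String)) : Option Nat :=
  (PySem.Dict.get? (PySem.Dict.mk m) "data").map
    (fun s => ((PySem.Str.split? s ",").getD []).length)
-- node passes A's first loop without returning or raising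
def pvOk1 (m : List (String × String)) : Bool :=
  (pvEntOf m).isSome && (pvEntOf m != some "LOCATION" || pvSplitLenOf m == some 3)
-- node makes A's first loop return 1
def pvBad1 (m : List (String × String)) : Bool :=
  pvEntOf m == some "LOCATION" && (pvSplitLenOf m).isSome && pvSplitLenOf m != some 3
-- node passes A's second loop without returning or raising
def pvOk2 (m : List (String × String)) : Bool :=
  pvEntOf m != some "DATE" || pvSplitLenOf m == some 4
-- node makes A's second loop raise KeyError ('data' missing on a DATE node)
def pvRaise2 (m : List (String × String)) : Bool :=
  pvEntOf m == some "DATE" && (pvSplitLenOf m).isNone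

-- Pre_ holds exactly when Python A returns, and excludes exactly the inputs where A raises KeyError
-- (a node missing 'ent_type' or a LOCATION node missing 'data' reached by the first loop before it
-- returns, or a DATE node missing 'data' reached by the second loop before it returns); B raises on
-- exactly those same inputs, so no input on which A returns a value is excluded.
def Pre_check_graph_dataformat_place_date (graph : List (String × List (String × (List (String × String))))) : Prop :=
  let nodes := PySem.Dict.getD (PySem.Dict.mk graph) "nodes" []
  (∃ i ∈ List.range nodes.length, pvBad1 (nodes[i]!.2) = true ∧
     ∀ j ∈ List.range i, pvOk1 (nodes[j]!.2) = true)
  ∨ ((∀ n ∈ nodes, pvOk1 n.2 = true) ∧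
     ¬ ∃ i ∈ List.range nodes.length, pvRaise2 (nodes[i]!.2) = true ∧
        ∀ j ∈ List.range i, pvOk2 (nodes[j]!.2) = true)
instance (graph : List (String × List (String × (List (String × String))))) : Decidable (Pre_check_graph_dataformat_place_date graph) := by unfold Pre_check_graph_dataformat_place_date; infer_instance

def pvWitness_check_graph_dataformat_place_date : (List (String × List (String × (List (String × String))))) :=
  [("nodes", [("a", [("ent_type", "LOCATION"), ("data", "x,y,z")]),
              ("b", [("ent_type", "DATE"), ("data", "a,b,c,d")])])]

def Spec_check_graph_dataformat_place_date (graph : List (String × List (String × (List (String × String))))) (out : Int) : Prop := out = check_graph_dataformat_place_date_alt graph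
instance (graph : List (String × List (String × (List (String × String))))) (out : Int) : Decidable (Spec_check_graph_dataformat_place_date graph out) := by unfold Spec_check_graph_dataformat_place_date; infer_instance

-- ===== CLAIM (what is proved, stated in full; the proofs are below) =====
def Claim_equal_check_graph_dataformat_place_date : Prop := ∀ (graph : List (String × List (String × (List (String × String))))), Dom_check_graph_dataformat_place_date graph → Pre_check_graph_dataformat_place_date graph → Spec_check_graph_dataformat_place_date graph (check_graph_dataformat_place_date graph)

-- ===== LEMMAS AND PROOFS =====

-- boolean versions of the two error tests, used only to state the loop characterisations
def pvLocBad (n : String × (List (String × String))) : Bool :=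
  decide (pvEntB n.2 = "LOCATION") && decide (pvDataLenB n.2 ≠ 3)
def pvDateBad (n : String × (List (String × String))) : Bool :=
  decide (pvEntB n.2 = "DATE") && decide (pvDataLenB n.2 ≠ 4)

theorem pvLocLoop_eq (nodes : List (String × (List (String × String)))) :
    pvLocLoop nodes = if nodes.any pvLocBad then some 1 else none := by
  induction nodes with
  | nil => simp [pvLocLoop]
  | cons n rest ih =>
    simp only [pvLocLoop]
    by_cases h1 : pvEntB n.2 = "LOCATION"
    · by_cases h2 : pvDataLenB n.2 ≠ 3
      · have ha : (n :: rest).any pvLocBad = true := by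
          simp [List.any_cons, pvLocBad, h1, h2]
        rw [ha]; rw [pvEntB] at h1; rw [if_pos h1, pvDataLenB] at *; rw [if_pos h2]; simp
      · have ha : (n :: rest).any pvLocBad = rest.any pvLocBad := by
          have hb : pvLocBad n = false := by
            simp only [pvLocBad, Bool.and_eq_false_iff, decide_eq_false_iff_not]; right; exact h2
          simp [List.any_cons, hb]
        rw [ha]; rw [pvEntB] at h1; rw [if_pos h1, pvDataLenB] at *; rw [if_neg h2]; exact ih
    · have ha : (n :: rest).any pvLocBad = rest.any pvLocBad := by
        have hb : pvLocBad n = false := by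
          simp only [pvLocBad, Bool.and_eq_false_iff, decide_eq_false_iff_not]; left; exact h1
        simp [List.any_cons, hb]
      rw [ha]; rw [pvEntB] at h1; rw [if_neg h1]; exact ih

theorem pvDateLoop_eq (nodes : List (String × (List (String × String)))) :
    pvDateLoop nodes = if nodes.any pvDateBad then some 2 else none := by
  induction nodes with
  | nil => simp [pvDateLoop]
  | cons n rest ih =>
    simp only [pvDateLoop]
    by_cases h1 : pvEntB n.2 = "DATE"
    · by_cases h2 : pvDataLenB n.2 ≠ 4
      · have ha : (n :: rest).any pvDateBad = true := by
          simp [List.any_cons, pvDateBad, h1, h2]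
        rw [ha]; rw [pvEntB] at h1; rw [if_pos h1, pvDataLenB] at *; rw [if_pos h2]; simp
      · have ha : (n :: rest).any pvDateBad = rest.any pvDateBad := by
          have hb : pvDateBad n = false := by
            simp only [pvDateBad, Bool.and_eq_false_iff, decide_eq_false_iff_not]; right; exact h2
          simp [List.any_cons, hb]
        rw [ha]; rw [pvEntB] at h1; rw [if_pos h1, pvDataLenB] at *; rw [if_neg h2]; exact ih
    · have ha : (n :: rest).any pvDateBad = rest.any pvDateBad := by
        have hb : pvDateBad n = false := by
          simp only [pvDateBad, Bool.and_eq_false_iff, decide_eq_false_iff_not]; left; exact h1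
        simp [List.any_cons, hb]
      rw [ha]; rw [pvEntB] at h1; rw [if_neg h1]; exact ih

theorem pvCollect_eq (nodes : List (String × (List (String × String))))
    (dates : List (List (String × String))) :
    pvCollect nodes dates =
      if nodes.any pvLocBad then none
      else some (dates ++ (nodes.filter (fun n => pvEntB n.2 = "DATE")).map (·.2)) := by
  induction nodes generalizing dates with
  | nil => simp [pvCollect]
  | cons n rest ih =>
    simp only [pvCollect]
    by_cases h1 : pvEntB n.2 = "LOCATION"
    · have hd : ¬ pvEntB n.2 = "DATE" := by rw [h1]; decide
      by_cases h2 : pvDataLenB n.2 ≠ 3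
      · have ha : (n :: rest).any pvLocBad = true := by
          simp [List.any_cons, pvLocBad, h1, h2]
        rw [ha, if_pos h1, if_pos h2]; simp
      · have ha : (n :: rest).any pvLocBad = rest.any pvLocBad := by
          have hb : pvLocBad n = false := by
            simp only [pvLocBad, Bool.and_eq_false_iff, decide_eq_false_iff_not]; right; exact h2
          simp [List.any_cons, hb]
        rw [ha, if_pos h1, if_neg h2, List.filter_cons_of_neg (by simp [hd])]
        exact ih dates
    · have ha : (n :: rest).any pvLocBad = rest.any pvLocBad := by
        have hb : pvLocBad n = false := by
          simp only [pvLocBad, Bool.and_eq_false_iff, decide_eq_false_iff_not]; left; exact h1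
        simp [List.any_cons, hb]
      rw [ha, if_neg h1]
      by_cases hd : pvEntB n.2 = "DATE"
      · rw [if_pos hd, List.filter_cons_of_pos (by simp [hd]), ih]
        simp [List.append_assoc]
      · rw [if_neg hd, List.filter_cons_of_neg (by simp [hd])]
        exact ih dates

theorem pvDateCheck_eq (entries : List (List (String × String))) :
    pvDateCheck entries = if entries.any (fun d => decide (pvDataLenB d ≠ 4)) then 2 else 0 := by
  induction entries with
  | nil => simp [pvDateCheck]
  | cons d rest ih =>
    simp only [pvDateCheck]
    by_cases h : pvDataLenB d ≠ 4
    · have ha : (d :: rest).any (fun d => decide (pvDataLenB d ≠ 4)) = true := by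
        simp [List.any_cons, h]
      rw [ha, if_pos h]; simp
    · have ha : (d :: rest).any (fun d => decide (pvDataLenB d ≠ 4)) =
          rest.any (fun d => decide (pvDataLenB d ≠ 4)) := by
        simp [List.any_cons, h]
      rw [ha, if_neg h]; exact ih

-- the date error exists among the collected DATE dicts iff it exists among all nodes
theorem pvAny_filter_map (nodes : List (String × (List (String × String)))) :
    ((nodes.filter (fun n => pvEntB n.2 = "DATE")).map (·.2)).any
        (fun d => decide (pvDataLenB d ≠ 4)) = nodes.any pvDateBad := by
  simp only [List.any_map, List.any_filter, Function.comp_def]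
  congr 1

-- ===== VERDICT (by name: the statement is the Claim_ definition above) =====
theorem check_graph_dataformat_place_date_spec : Claim_equal_check_graph_dataformat_place_date := by
  intro graph _ _
  unfold Spec_check_graph_dataformat_place_date
  simp only [check_graph_dataformat_place_date, check_graph_dataformat_place_date_alt]
  rw [pvLocLoop_eq, pvDateLoop_eq, pvCollect_eq]
  by_cases hl : (PySem.Dict.getD (PySem.Dict.mk graph) "nodes" []).any pvLocBad = true
  · rw [if_pos hl, if_pos hl]
  · rw [if_neg hl, if_neg hl]
    simp only [List.nil_append]
    rw [pvDateCheck_eq, pvAny_filter_map]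
    by_cases hd : (PySem.Dict.getD (PySem.Dict.mk graph) "nodes" []).any pvDateBad = true
    · rw [if_pos hd, if_pos hd]
    · rw [if_neg hd, if_neg hd]
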